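-- pv_equiv track=rewrite | github.com/chaosnabilera/problemsolving | codeforces/problemset/1525/1525b.py | solve
-- ===== SOURCE A (Python) =====
-- def solve(n, arr):
-- 	for i in range(1,n):
-- 		if arr[i] < arr[i-1]:
-- 			break
-- 	else:
-- 		return 0
--
-- 	if arr[0] == 1 or arr[-1] == n:
-- 		return 1
--
-- 	if arr[0] == n and arr[-1] == 1:
-- 		return 3
-- 	else:
-- 		return 2
-- ===== SOURCE B (Python) =====
-- def solve(n, arr):
--     head = arr[:n]
--     if n < 2 or head == sorted(head):
--         return 0
--     if arr[0] == 1 or arr[-1] == n: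
--         return 1
--     if arr[0] == n and arr[-1] == 1:
--         return 3
--     return 2
-- ===== Notes on version B (the rewrite author's own statement) =====
-- stated objective: idiomatic
-- what changed: The early-exit index loop with for-else that scans range(1,n) for the first adjacent inversion is replaced by a single sort-and-compare test 'head == sorted(head)' on the length-n prefix (with the trivial n < 2 case short-circuited); the constant-time classification branches are kept.
import Mathlib
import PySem

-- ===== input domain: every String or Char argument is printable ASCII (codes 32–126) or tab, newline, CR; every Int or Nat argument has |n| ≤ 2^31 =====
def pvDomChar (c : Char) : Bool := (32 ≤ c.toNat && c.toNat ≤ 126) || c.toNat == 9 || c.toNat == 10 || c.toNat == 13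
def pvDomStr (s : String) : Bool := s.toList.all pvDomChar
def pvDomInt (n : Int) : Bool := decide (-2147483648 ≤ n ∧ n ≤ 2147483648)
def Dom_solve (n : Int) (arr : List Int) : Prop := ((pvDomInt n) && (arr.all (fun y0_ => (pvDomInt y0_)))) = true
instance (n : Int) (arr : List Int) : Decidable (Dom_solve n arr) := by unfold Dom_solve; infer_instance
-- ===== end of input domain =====

-- B replaces A's early-exit adjacent-inversion scan with an idiomatic sort-and-compare
-- sortedness test on the length-n prefix; return values are proved equal wherever A returns.

-- ===== PORT A =====
-- the for-loop 'for i in range(1, n)' with its break: true iff the 'break' fires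
def solveLoopA (arr : List Int) (n : Int) (i : Int) : Bool :=
  if _h : i < n then
    if PySem.List.pyGetD arr i 0 < PySem.List.pyGetD arr (i - 1) 0 then true
    else solveLoopA arr n (i + 1)
  else false
termination_by (n - i).toNat
decreasing_by omega

def solve (n : Int) (arr : List Int) : Int :=
  if solveLoopA arr n 1 = false then 0
  else if PySem.List.pyGetD arr 0 0 = 1 ∨ PySem.List.pyGetD arr (-1) 0 = n then 1
  else if PySem.List.pyGetD arr 0 0 = n ∧ PySem.List.pyGetD arr (-1) 0 = 1 then 3
  else 2

-- ===== PORT B =====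
-- Source B's local variable 'head = arr[:n]'
def headB (n : Int) (arr : List Int) : List Int := PySem.List.slice arr none (some n)

def solve_alt (n : Int) (arr : List Int) : Int :=
  if n < 2 ∨ headB n arr = PySem.List.sorted (headB n arr) (fun x => x) false then 0
  else if PySem.List.pyGetD arr 0 0 = 1 ∨ PySem.List.pyGetD arr (-1) 0 = n then 1
  else if PySem.List.pyGetD arr 0 0 = n ∧ PySem.List.pyGetD arr (-1) 0 = 1 then 3
  else 2

-- ===== PRECONDITION & SPEC =====
-- Pre_ excludes exactly the inputs on which A raises IndexError: when n exceeds len(arr)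
-- (and 2 ≤ n) with a fully non-decreasing arr, A's scan runs past the end of the array.
def Pre_solve (n : Int) (arr : List Int) : Prop :=
  ¬ (2 ≤ n ∧ (arr.length : Int) < n ∧ arr.Pairwise (· ≤ ·))
instance (n : Int) (arr : List Int) : Decidable (Pre_solve n arr) := by unfold Pre_solve; infer_instance

def pvWitness_solve : Int × List Int := (2, [2, 1])

def Spec_solve (n : Int) (arr : List Int) (out : Int) : Prop := out = solve_alt n arr
instance (n : Int) (arr : List Int) (out : Int) : Decidable (Spec_solve n arr out) := by unfold Spec_solve; infer_instance

-- ===== CLAIM (what is proved, stated in full; the proofs are below) =====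
def Claim_equal_solve : Prop := ∀ (n : Int) (arr : List Int), Dom_solve n arr → Pre_solve n arr → Spec_solve n arr (solve n arr)

-- ===== LEMMAS AND PROOFS =====

-- A's loop finds no inversion iff no index it scans is a descent
lemma solveLoopA_false_iff (arr : List Int) (n : Int) :
    ∀ i : Int, (solveLoopA arr n i = false ↔
      ∀ j : Int, i ≤ j → j < n → ¬ (PySem.List.pyGetD arr j 0 < PySem.List.pyGetD arr (j - 1) 0)) := by
  intro i
  induction hfuel : (n - i).toNat generalizing i with
  | zero =>
      have hge : ¬ i < n := by omega
      rw [solveLoopA, dif_neg hge]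
      constructor
      · intro _ j h1 h2
        omega
      · intro _
        rfl
  | succ m ih =>
      have hlt : i < n := by omega
      rw [solveLoopA, dif_pos hlt]
      by_cases hd : PySem.List.pyGetD arr i 0 < PySem.List.pyGetD arr (i - 1) 0
      · rw [if_pos hd]
        exact iff_of_false (by simp) (fun hall => absurd hd (hall i le_rfl hlt))
      · rw [if_neg hd, ih (i + 1) (by omega)]
        constructor
        · intro hall j h1 h2
          by_cases hj : j = i
          · exact hj ▸ hd
          · exact hall j (by omega) h2
        · intro hall j h1 h2
          exact hall j (by omega) h2

-- B's sort-and-compare test is exactly pairwise non-decreasingness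
lemma eq_sorted_iff_pairwise (l : List Int) :
    l = PySem.List.sorted l (fun x => x) false ↔ l.Pairwise (· ≤ ·) := by
  constructor
  · intro h
    have hs := PySem.List.sorted_pairwise l (fun x => x)
    rw [← h] at hs
    simpa using hs
  · intro h
    symm
    exact PySem.List.sorted_eq_self_of_pairwise l (fun x => x) (by simpa using h)

-- sortedness of a prefix, phrased element-wise on the original list
lemma take_pairwise_iff (arr : List Int) (m : Nat) :
    (arr.take m).Pairwise (· ≤ ·) ↔
      ∀ k : Nat, k + 1 < min m arr.length → arr.getD k 0 ≤ arr.getD (k + 1) 0 := by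
  rw [← List.isChain_iff_pairwise, List.isChain_iff_getElem]
  constructor
  · intro hc k hk
    have hk' : k + 1 < (arr.take m).length := by simp only [List.length_take]; omega
    have h := hc k hk'
    rw [List.getD_eq_getElem arr 0 (by omega), List.getD_eq_getElem arr 0 (by omega)]
    simpa [List.getElem_take] using h
  · intro hc k hk
    simp only [List.length_take] at hk
    have h := hc k (by omega)
    rw [List.getD_eq_getElem arr 0 (by omega), List.getD_eq_getElem arr 0 (by omega)] at h
    simpa [List.getElem_take] using h

-- for 2 ≤ n, whenever A does not raise, A's scan and B's prefix test agree
lemma break_false_iff_take (arr : List Int) (n : Int) (h2 : 2 ≤ n)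
    (hp : n ≤ (arr.length : Int) ∨ ¬ arr.Pairwise (· ≤ ·)) :
    solveLoopA arr n 1 = false ↔
      arr.take n.toNat = PySem.List.sorted (arr.take n.toNat) (fun x => x) false := by
  have key : ∀ i : Int, 0 ≤ i → PySem.List.pyGetD arr i 0 = arr.getD i.toNat 0 := by
    intro i hi
    conv_lhs => rw [show i = ((i.toNat : Nat) : Int) from by omega]
    rw [PySem.List.pyGetD_natCast]
  rw [eq_sorted_iff_pairwise, take_pairwise_iff, solveLoopA_false_iff]
  by_cases hlen : n ≤ (arr.length : Int)
  · constructor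
    · intro h k hk
      have hx := h ((k : Int) + 1) (by omega) (by omega)
      rw [key _ (by omega), key _ (by omega)] at hx
      have e1 : ((k : Int) + 1).toNat = k + 1 := by omega
      have e2 : ((k : Int) + 1 - 1).toNat = k := by omega
      rw [e1, e2] at hx
      omega
    · intro h i h1i h2i hlt
      rw [key _ (by omega), key _ (by omega)] at hlt
      have hadj := h (i.toNat - 1) (by omega)
      have e1 : i.toNat - 1 + 1 = i.toNat := by omega
      have e2 : (i - 1).toNat = i.toNat - 1 := by omega
      rw [e1] at hadj
      rw [e2] at hlt
      omega
  · -- n exceeds the length: A returns only because arr has a real descent, so both sides fail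
    have hnp : ¬ arr.Pairwise (· ≤ ·) := hp.resolve_left hlen
    rw [← List.isChain_iff_pairwise, List.isChain_iff_getElem] at hnp
    push Not at hnp
    obtain ⟨k, hk, hdes⟩ := hnp
    have hd : arr.getD (k + 1) 0 < arr.getD k 0 := by
      rw [List.getD_eq_getElem arr 0 (by omega), List.getD_eq_getElem arr 0 (by omega)]
      omega
    constructor
    · intro h
      exfalso
      have hx := h ((k : Int) + 1) (by omega) (by omega)
      rw [key _ (by omega), key _ (by omega)] at hx
      have e1 : ((k : Int) + 1).toNat = k + 1 := by omega
      have e2 : ((k : Int) + 1 - 1).toNat = k := by omega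
      rw [e1, e2] at hx
      omega
    · intro h
      exfalso
      have hx := h k (by omega)
      omega

-- ===== VERDICT (by name: the statement is the Claim_ definition above) =====
theorem solve_spec : Claim_equal_solve := by
  intro n arr _ hpre
  unfold Pre_solve at hpre
  unfold Spec_solve solve solve_alt headB
  by_cases h2 : n < 2
  · rw [if_pos (show solveLoopA arr n 1 = false from by
      rw [solveLoopA, dif_neg (show ¬ (1 : Int) < n from by omega)])]
    rw [if_pos (show n < 2 ∨ PySem.List.slice arr none (some n) =
      PySem.List.sorted (PySem.List.slice arr none (some n)) (fun x => x) false from Or.inl h2)]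
  · have h2' : 2 ≤ n := by omega
    have hslice : PySem.List.slice arr none (some n) = arr.take n.toNat :=
      PySem.List.slice_to arr (by omega)
    have hp : n ≤ (arr.length : Int) ∨ ¬ arr.Pairwise (· ≤ ·) := by
      by_cases hl : n ≤ (arr.length : Int)
      · exact Or.inl hl
      · exact Or.inr (fun hpw => hpre ⟨h2', by omega, hpw⟩)
    have hiff := break_false_iff_take arr n h2' hp
    rw [hslice]
    by_cases hb : arr.take n.toNat = PySem.List.sorted (arr.take n.toNat) (fun x => x) false
    · rw [if_pos (hiff.mpr hb)]
      rw [if_pos (show n < 2 ∨ arr.take n.toNat =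
        PySem.List.sorted (arr.take n.toNat) (fun x => x) false from Or.inr hb)]
    · rw [if_neg (show ¬ solveLoopA arr n 1 = false from fun hf => hb (hiff.mp hf))]
      rw [if_neg (show ¬ (n < 2 ∨ arr.take n.toNat =
        PySem.List.sorted (arr.take n.toNat) (fun x => x) false) from by
          rintro (h | h)
          · omega
          · exact hb h)]
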